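-- pv_equiv track=rewrite | github.com/shreyasabharwal/Data-Structures-and-Algorithms | Recursion and Dynamic Programming/DNAAnalyzer.py | dna_analyser_part1
-- ===== SOURCE A (Python) =====
-- def dna_analyser_part1(list_str):
--     chars = ['A', 'T', 'G', 'C']
--     valid_list = []
--     for string in list_str:
--         valid = True
--         if len(string) > 10 and len(string) < 100 and string.isupper() and string:
--             for char in string:
--                 if char not in chars:
--                     valid = False
--                     break
--             if valid == True:
--                 valid_list.append(string)
--     return valid_list
-- ===== SOURCE B (Python) =====
-- def dna_analyser_part1(list_str):
--     # A string of length >10 consisting only of A/T/G/C is automatically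
--     # nonempty and isupper(), so counting the four bases and comparing the
--     # total with the length decides validity without scanning characters
--     # or testing case.
--     return [s for s in list_str
--             if 10 < len(s) < 100
--             and s.count('A') + s.count('T') + s.count('G') + s.count('C') == len(s)]
-- ===== Notes on version B (the rewrite author's own statement) =====
-- stated objective: alternative
-- what changed: Replaces the per-character membership loop with break flag and the isupper()/nonempty guards by an arithmetic criterion: the string is valid iff the counts of 'A','T','G','C' sum to its length (which already implies nonempty and uppercase), computed via four str.count passes in a comprehension.
import Mathlib
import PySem

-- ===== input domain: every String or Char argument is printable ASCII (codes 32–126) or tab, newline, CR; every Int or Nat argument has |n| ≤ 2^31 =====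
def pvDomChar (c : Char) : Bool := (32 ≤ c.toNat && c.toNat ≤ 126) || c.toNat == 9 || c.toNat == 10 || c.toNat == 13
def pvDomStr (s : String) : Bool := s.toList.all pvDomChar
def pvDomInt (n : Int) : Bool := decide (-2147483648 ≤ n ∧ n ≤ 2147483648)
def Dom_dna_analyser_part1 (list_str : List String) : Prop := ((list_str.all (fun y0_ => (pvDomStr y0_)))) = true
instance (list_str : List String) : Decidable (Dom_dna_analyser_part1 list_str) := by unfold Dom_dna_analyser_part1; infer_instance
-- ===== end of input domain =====

-- B replaces A's per-character loop with break flag and its isupper()/nonempty guards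
-- by an arithmetic criterion: counts of 'A','T','G','C' sum to the length (objective: alternative).

-- str.isupper(): at least one cased character and no lowercase cased character;
-- exact on the ASCII domain, where the cased characters are exactly the letters.
def pyStrIsupper (s : String) : Bool :=
  s.toList.any PySem.Chars.isalpha && s.toList.all (fun c => !(PySem.Chars.islower c))

-- ===== PORT A =====
def pyCharsDNA : List Char := ['A', 'T', 'G', 'C']

-- the inner 'for char in string: if char not in chars: valid = False; break'
def aScan : List Char → Bool
  | [] => true
  | c :: rest => if !(pyCharsDNA.contains c) then false else aScan rest

def dna_analyser_part1 (list_str : List String) : List String :=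
  list_str.foldl (fun valid_list s =>
    if (10 < PySem.Str.len s && PySem.Str.len s < 100) && pyStrIsupper s && !(s == "") then
      (if aScan s.toList then valid_list ++ [s] else valid_list)
    else valid_list) []

-- ===== PORT B =====
-- s.count('A') for a one-character pattern is exactly the number of occurrences of
-- that character, ported as List.count on s.toList (exact).
def dna_analyser_part1_alt (list_str : List String) : List String :=
  list_str.filter (fun s =>
    (10 < PySem.Str.len s && PySem.Str.len s < 100) &&
      ((s.toList.count 'A' + s.toList.count 'T' + s.toList.count 'G' + s.toList.count 'C' : Int)
        == PySem.Str.len s))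

-- ===== PRECONDITION & SPEC =====
def Spec_dna_analyser_part1 (list_str : List String) (out : List String) : Prop := out = dna_analyser_part1_alt list_str
instance (list_str : List String) (out : List String) : Decidable (Spec_dna_analyser_part1 list_str out) := by unfold Spec_dna_analyser_part1; infer_instance

-- ===== CLAIM (what is proved, stated in full; the proofs are below) =====
def Claim_equal_dna_analyser_part1 : Prop := ∀ (list_str : List String), Dom_dna_analyser_part1 list_str → Spec_dna_analyser_part1 list_str (dna_analyser_part1 list_str)

-- ===== LEMMAS AND PROOFS =====

theorem aScan_eq_all (l : List Char) : aScan l = l.all (fun c => pyCharsDNA.contains c) := by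
  induction l with
  | nil => rfl
  | cons c rest ih =>
      rw [aScan, List.all_cons, ih]
      cases pyCharsDNA.contains c <;> simp

-- the four base counts sum to a countP, and countP = length iff all characters are bases
theorem count4_eq_countP (l : List Char) :
    l.count 'A' + l.count 'T' + l.count 'G' + l.count 'C'
      = l.countP (fun c => pyCharsDNA.contains c) := by
  induction l with
  | nil => rfl
  | cons x xs ih =>
      simp only [List.count_cons, List.countP_cons]
      by_cases hA : x = 'A' <;> by_cases hT : x = 'T' <;> by_cases hG : x = 'G' <;>
        by_cases hC : x = 'C' <;> simp_all [pyCharsDNA] <;> omega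

theorem count4_eq_len_iff (l : List Char) :
    (l.count 'A' + l.count 'T' + l.count 'G' + l.count 'C' = l.length) ↔
      (∀ c ∈ l, pyCharsDNA.contains c = true) := by
  rw [count4_eq_countP]
  exact List.countP_eq_length

-- each of the four bases is an uppercase letter
theorem base_isalpha (c : Char) (h : pyCharsDNA.contains c = true) : PySem.Chars.isalpha c = true := by
  simp only [pyCharsDNA, List.contains_eq_mem, List.mem_cons, List.not_mem_nil, or_false,
    decide_eq_true_eq] at h
  rcases h with h | h | h | h <;> subst h <;> decide

theorem base_not_islower (c : Char) (h : pyCharsDNA.contains c = true) : PySem.Chars.islower c = false := by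
  simp only [pyCharsDNA, List.contains_eq_mem, List.mem_cons, List.not_mem_nil, or_false,
    decide_eq_true_eq] at h
  rcases h with h | h | h | h <;> subst h <;> decide

-- a nonempty all-bases string is isupper
theorem isupper_of_bases (s : String) (hne : s.toList ≠ [])
    (h : ∀ c ∈ s.toList, pyCharsDNA.contains c = true) : pyStrIsupper s = true := by
  unfold pyStrIsupper
  rcases hl : s.toList with _ | ⟨c, rest⟩
  · exact absurd hl hne
  · rw [hl] at h
    apply Bool.and_eq_true_iff.mpr
    constructor
    · rw [List.any_cons]
      rw [base_isalpha c (h c (List.mem_cons_self))]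
      simp
    · rw [List.all_eq_true]
      intro x hx
      rw [base_not_islower x (h x hx)]
      rfl

theorem nonempty_of_len (s : String) (h : (10 : Int) < PySem.Str.len s) : s.toList ≠ [] := by
  rw [PySem.Str.len_eq] at h
  intro he
  rw [he] at h; simp at h

-- the per-string conditions of A and B agree
theorem cond_eq (s : String) :
    (((10 < PySem.Str.len s && PySem.Str.len s < 100) && pyStrIsupper s && !(s == "")) && aScan s.toList)
      = (((10 < PySem.Str.len s && PySem.Str.len s < 100) &&
          ((s.toList.count 'A' + s.toList.count 'T' + s.toList.count 'G' + s.toList.count 'C' : Int)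
            == PySem.Str.len s)) : Bool) := by
  rw [aScan_eq_all]
  by_cases hl : (10 : Int) < PySem.Str.len s
  · have hne : s.toList ≠ [] := nonempty_of_len s hl
    have hne' : (s == "") = false := by
      rw [beq_eq_false_iff_ne]; intro he; exact hne (by rw [he]; rfl)
    rw [hne', decide_eq_true hl]
    have hcount :
        (((s.toList.count 'A' + s.toList.count 'T' + s.toList.count 'G' + s.toList.count 'C' : Int)
            == PySem.Str.len s) : Bool)
          = s.toList.all (fun c => pyCharsDNA.contains c) := by
      rw [PySem.Str.len_eq]
      by_cases hb : ∀ c ∈ s.toList, pyCharsDNA.contains c = true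
      · have h1 := (count4_eq_len_iff s.toList).mpr hb
        have h2 : s.toList.all (fun c => pyCharsDNA.contains c) = true := by
          simpa [List.all_eq_true] using hb
        rw [h2, beq_iff_eq]
        exact_mod_cast h1
      · have h1 : ¬ (s.toList.count 'A' + s.toList.count 'T' + s.toList.count 'G' + s.toList.count 'C' = s.toList.length) :=
          fun h => hb ((count4_eq_len_iff s.toList).mp h)
        have h2 : s.toList.all (fun c => pyCharsDNA.contains c) = false := by
          rw [Bool.eq_false_iff]; intro hc
          exact hb (by simpa [List.all_eq_true] using hc)
        rw [h2, beq_eq_false_iff_ne]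
        intro hc
        apply h1
        exact_mod_cast hc
    rw [hcount]
    by_cases hall : s.toList.all (fun c => pyCharsDNA.contains c) = true
    · have hiu : pyStrIsupper s = true :=
        isupper_of_bases s hne (by simpa [List.all_eq_true] using hall)
      rw [hiu, hall]
      cases decide (PySem.Str.len s < 100) <;> rfl
    · rw [Bool.not_eq_true] at hall
      rw [hall]
      cases decide (PySem.Str.len s < 100) <;> cases pyStrIsupper s <;> rfl
  · rw [decide_eq_false hl]
    cases pyStrIsupper s <;> cases aScan_cases : s.toList.all (fun c => pyCharsDNA.contains c) <;> rfl

theorem if_if {α : Type} (p q : Bool) (a b : α) :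
    (if p then (if q then a else b) else b) = if p && q then a else b := by
  cases p <;> cases q <;> simp

theorem foldl_eq_filter (l : List String) (acc : List String) :
    l.foldl (fun valid_list s =>
      if (10 < PySem.Str.len s && PySem.Str.len s < 100) && pyStrIsupper s && !(s == "") then
        (if aScan s.toList then valid_list ++ [s] else valid_list)
      else valid_list) acc
    = acc ++ l.filter (fun s =>
        (10 < PySem.Str.len s && PySem.Str.len s < 100) &&
          ((s.toList.count 'A' + s.toList.count 'T' + s.toList.count 'G' + s.toList.count 'C' : Int)
            == PySem.Str.len s)) := by
  induction l generalizing acc with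
  | nil => rw [List.foldl_nil, List.filter_nil, List.append_nil]
  | cons s rest ih =>
      rw [List.foldl_cons, if_if, cond_eq, List.filter_cons]
      cases hc : (((10 < PySem.Str.len s && PySem.Str.len s < 100) &&
          ((s.toList.count 'A' + s.toList.count 'T' + s.toList.count 'G' + s.toList.count 'C' : Int)
            == PySem.Str.len s)) : Bool)
      · simp only [Bool.false_eq_true, if_false]
        exact ih acc
      · simp only [if_true]
        rw [ih (acc ++ [s]), List.append_assoc]
        rfl

-- ===== VERDICT (by name: the statement is the Claim_ definition above) =====
theorem dna_analyser_part1_spec : Claim_equal_dna_analyser_part1 := by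
  intro l _
  unfold Spec_dna_analyser_part1 dna_analyser_part1 dna_analyser_part1_alt
  exact (foldl_eq_filter l []).trans (by rw [List.nil_append])
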